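-- pv_equiv track=rewrite | github.com/shiveshsky/datastructures | greedy/coins.py | solve
-- ===== SOURCE A (Python) =====
-- def solve(A):
--     dp = [0]*100
--     for i in range(0, 100):
--         dp[i]=1000
--     dp[0]=0
--     for i in range(1, 100):
--         dp[i]=min(dp[i-1]+1, dp[i])
--     for i in range(10, 100):
--         dp[i]=min(dp[i-10]+1, dp[i])
--     for i in range(25, 100):
--         dp[i]=min(dp[i-25]+1, dp[i])
--     ans = 0
--     while A>0:
--         ans+=dp[int(A%100)]
--         A//=100
--     return ans
-- ===== SOURCE B (Python) =====
-- def solve(A):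
--     ans = 0
--     while A > 0:
--         d = int(A % 100)
--         ans += min(q + (d - 25 * q) // 10 + (d - 25 * q) % 10
--                    for q in range(d // 25 + 1))
--         A //= 100
--     return ans
-- ===== Notes on version B (the rewrite author's own statement) =====
-- stated objective: simpler
-- what changed: Replaced A's precomputed DP table over all base-hundred digits (four table-filling loops) with a direct per-digit computation that enumerates the quarter count and costs the remainder greedily with dimes plus pennies.
import Mathlib
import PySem

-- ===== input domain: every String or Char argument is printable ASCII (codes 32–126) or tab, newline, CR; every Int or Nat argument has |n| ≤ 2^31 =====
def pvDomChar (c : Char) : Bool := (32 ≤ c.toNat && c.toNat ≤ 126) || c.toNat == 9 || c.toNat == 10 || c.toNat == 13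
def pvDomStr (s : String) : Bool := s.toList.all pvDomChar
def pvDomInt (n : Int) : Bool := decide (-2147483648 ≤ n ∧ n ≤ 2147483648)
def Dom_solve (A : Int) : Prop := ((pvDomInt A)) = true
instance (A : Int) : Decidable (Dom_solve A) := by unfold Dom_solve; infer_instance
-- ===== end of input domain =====

-- B replaces A's 100-entry DP table with a per-digit quarter-enumeration closed form (simpler).

-- ===== PORT A =====
-- the DP table of A (the four table-filling loops, transliterated)
def solveDp : List Int :=
  let dp := List.replicate 100 (0 : Int)
  let dp := (List.range' 0 100).foldl (fun dp i => dp.set i 1000) dp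
  let dp := dp.set 0 0
  let dp := (List.range' 1 99).foldl
    (fun dp i => dp.set i (min (dp.getD (i - 1) 0 + 1) (dp.getD i 0))) dp
  let dp := (List.range' 10 90).foldl
    (fun dp i => dp.set i (min (dp.getD (i - 10) 0 + 1) (dp.getD i 0))) dp
  let dp := (List.range' 25 75).foldl
    (fun dp i => dp.set i (min (dp.getD (i - 25) 0 + 1) (dp.getD i 0))) dp
  dp

-- the 'while A>0' loop of A (ans accumulator)
def solveLoop (ans A : Int) : Int :=
  if h : A > 0 then
    solveLoop (ans + solveDp.getD (PySem.Int.mod A 100).toNat 0) (PySem.Int.floordiv A 100)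
  else ans
termination_by A.toNat
decreasing_by
  have : PySem.Int.floordiv A 100 = A / 100 := PySem.Int.floordiv_eq_ediv_of_pos (by omega)
  rw [this]; omega

def solve (A : Int) : Int := solveLoop 0 A

-- ===== PORT B =====
-- min(q + (d-25q)//10 + (d-25q)%10 for q in range(d//25+1)); the range is nonempty for d ≥ 0,
-- so the .getD 0 default on min? is never used on the inputs the loop produces
def coinsAlt (d : Int) : Int :=
  ((PySem.List.pyRange 0 (PySem.Int.floordiv d 25 + 1) 1).map
    (fun q => q + PySem.Int.floordiv (d - 25 * q) 10 + PySem.Int.mod (d - 25 * q) 10)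
    |> (PySem.List.min? · (fun x => x))).getD 0

def solveAltLoop (ans A : Int) : Int :=
  if h : A > 0 then
    solveAltLoop (ans + coinsAlt (PySem.Int.mod A 100)) (PySem.Int.floordiv A 100)
  else ans
termination_by A.toNat
decreasing_by
  have : PySem.Int.floordiv A 100 = A / 100 := PySem.Int.floordiv_eq_ediv_of_pos (by omega)
  rw [this]; omega

def solve_alt (A : Int) : Int := solveAltLoop 0 A

-- ===== PRECONDITION & SPEC =====
def Spec_solve (A : Int) (out : Int) : Prop := out = solve_alt A
instance (A : Int) (out : Int) : Decidable (Spec_solve A out) := by unfold Spec_solve; infer_instance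

-- ===== CLAIM (what is proved, stated in full; the proofs are below) =====
def Claim_equal_solve : Prop := ∀ (A : Int), Dom_solve A → Spec_solve A (solve A)

-- ===== LEMMAS AND PROOFS =====
-- per-digit agreement: the DP table entry equals the quarter-enumeration value for 0 ≤ d < 100
set_option maxRecDepth 8000 in
lemma digit_agree : ∀ r : Nat, r < 100 → solveDp.getD r 0 = coinsAlt r := by
  decide

lemma digit_agree_int (d : Int) (h0 : 0 ≤ d) (h1 : d < 100) :
    solveDp.getD d.toNat 0 = coinsAlt d := by
  have : d = (d.toNat : Int) := by omega
  rw [this]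
  exact digit_agree d.toNat (by omega)

lemma loop_agree (A ans : Int) : solveLoop ans A = solveAltLoop ans A := by
  by_cases h : A > 0
  · rw [solveLoop, solveAltLoop]
    simp only [h, dite_true]
    have hm0 : 0 ≤ PySem.Int.mod A 100 := by
      rw [PySem.Int.mod_eq_emod_of_pos (by omega)]; omega
    have hm1 : PySem.Int.mod A 100 < 100 := by
      rw [PySem.Int.mod_eq_emod_of_pos (by omega)]; omega
    rw [digit_agree_int _ hm0 hm1]
    exact loop_agree _ _
  · rw [solveLoop, solveAltLoop]
    simp [h]
termination_by A.toNat
decreasing_by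
  have : PySem.Int.floordiv A 100 = A / 100 := PySem.Int.floordiv_eq_ediv_of_pos (by omega)
  rw [this]; omega

-- ===== VERDICT (by name: the statement is the Claim_ definition above) =====
theorem solve_spec : Claim_equal_solve := by
  intro A _
  unfold Spec_solve solve solve_alt
  exact loop_agree A 0
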